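-- pv_equiv track=rewrite | github.com/BerkeBozaci/pilot-app | full_app_with_measurements.py | is_blocked_domain
-- ===== SOURCE A (Python) =====
-- from typing import List, Tuple, Optional, Dict, Any
-- from typing import Optional, Dict, Any, List
--
-- def _normalize_domain(netloc: str) -> str:
--     d = (netloc or "").lower().strip()
--     d = d.split(":")[0]
--     if d.startswith("www."):
--         d = d[4:]
--     return d
--
-- def is_blocked_domain(domain: str, blocklist: List[str]) -> bool:
--     d = _normalize_domain(domain)
--     for b in blocklist:
--         b = b.strip().lower()
--         if not b:
--             continue
--         # allow entries like "houzz.com/discussions" to behave like "houzz.com"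
--         b = b.split("/")[0]
--         b = _normalize_domain(b)
--         if d == b or d.endswith("." + b):
--             return True
--     return False
-- ===== SOURCE B (Python) =====
-- from typing import List
--
--
-- def _normalize_domain(netloc: str) -> str:
--     d = (netloc or "").lower().strip()
--     d = d.split(":")[0]
--     if d.startswith("www."):
--         d = d[4:]
--     return d
--
--
-- def is_blocked_domain(domain: str, blocklist: List[str]) -> bool:
--     entries = set()
--     for b in blocklist:
--         s = b.strip().lower()
--         if not s:
--             continue
--         entries.add(_normalize_domain(s.split("/")[0]))
--     d = _normalize_domain(domain)
--     return d in entries or any(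
--         ch == "." and d[i + 1:] in entries for i, ch in enumerate(d)
--     )
-- ===== Notes on version B (the rewrite author's own statement) =====
-- stated objective: alternative
-- what changed: B builds a set of normalized blocklist entries once and then probes it with the normalized domain and each of its dot-suffixes, instead of A's per-entry equality/endswith scan over the whole blocklist.
import Mathlib
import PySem

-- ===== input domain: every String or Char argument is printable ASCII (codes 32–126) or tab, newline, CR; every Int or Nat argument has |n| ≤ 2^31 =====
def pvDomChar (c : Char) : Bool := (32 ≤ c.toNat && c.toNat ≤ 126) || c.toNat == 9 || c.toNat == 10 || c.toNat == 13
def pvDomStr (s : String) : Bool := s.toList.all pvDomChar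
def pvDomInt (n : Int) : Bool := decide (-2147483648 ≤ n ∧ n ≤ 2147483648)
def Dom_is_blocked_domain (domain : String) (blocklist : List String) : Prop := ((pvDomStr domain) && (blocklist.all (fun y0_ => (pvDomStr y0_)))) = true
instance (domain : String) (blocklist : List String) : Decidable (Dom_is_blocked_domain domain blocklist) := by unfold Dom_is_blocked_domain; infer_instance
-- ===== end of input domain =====

-- B replaces A's per-entry suffix scan by a set of normalized entries probed with the
-- domain and each of its dot-suffixes (objective: alternative decomposition).

-- ===== PORT A =====
-- shared helper: Python `_normalize_domain` (identical in Source A and Source B).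
-- `(netloc or "")` is `netloc` itself for strings ("" stays ""); `d.split(":")` with a
-- nonempty separator never raises and never returns an empty list, so `[0]` is `headD ""`.
def normalize_domain (netloc : String) : String :=
  let d := PySem.Str.strip (PySem.Str.lower netloc)
  let d := ((PySem.Str.split? d ":").getD []).headD ""
  if PySem.Str.startswith d "www." then PySem.Str.slice d (some 4) none else d

-- the body of A's for-loop applied to one blocklist entry
def hitA (d : String) (b : String) : Bool :=
  let b1 := PySem.Str.lower (PySem.Str.strip b)
  if b1 = "" then false
  else
    let b2 := ((PySem.Str.split? b1 "/").getD []).headD ""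
    let b3 := normalize_domain b2
    d = b3 || PySem.Str.endswith d ("." ++ b3)

-- A's loop with early return
def loopA (d : String) : List String → Bool
  | [] => false
  | b :: rest => if hitA d b then true else loopA d rest

def is_blocked_domain (domain : String) (blocklist : List String) : Bool :=
  loopA (normalize_domain domain) blocklist

-- ===== PORT B =====
-- the set-building loop of Source B
def entriesB (blocklist : List String) : PySem.Set String :=
  blocklist.foldl (fun s b =>
    let t := PySem.Str.lower (PySem.Str.strip b)
    if t = "" then s
    else PySem.Set.add s (normalize_domain (((PySem.Str.split? t "/").getD []).headD "")))
    PySem.Set.empty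

def is_blocked_domain_alt (domain : String) (blocklist : List String) : Bool :=
  let entries := entriesB blocklist
  let d := normalize_domain domain
  PySem.Set.contains entries d ||
    (PySem.List.enumerate d.toList 0).any (fun p =>
      p.2 == '.' && PySem.Set.contains entries (PySem.Str.slice d (some (p.1 + 1)) none))

-- ===== PRECONDITION & SPEC =====
def Spec_is_blocked_domain (domain : String) (blocklist : List String) (out : Bool) : Prop := out = is_blocked_domain_alt domain blocklist
instance (domain : String) (blocklist : List String) (out : Bool) : Decidable (Spec_is_blocked_domain domain blocklist out) := by unfold Spec_is_blocked_domain; infer_instance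

-- ===== CLAIM (what is proved, stated in full; the proofs are below) =====
def Claim_equal_is_blocked_domain : Prop := ∀ (domain : String) (blocklist : List String), Dom_is_blocked_domain domain blocklist → Spec_is_blocked_domain domain blocklist (is_blocked_domain domain blocklist)

-- ===== LEMMAS AND PROOFS =====

-- A's early-return loop is an existential over the list
theorem loopA_iff (d : String) (bl : List String) :
    loopA d bl = true ↔ ∃ b ∈ bl, hitA d b = true := by
  induction bl with
  | nil => simp [loopA]
  | cons b rest ih =>
    simp only [loopA]
    by_cases h : hitA d b = true
    · simp [h]
    · simp [h, ih]

-- membership in B's set of normalized entries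
theorem mem_entriesB_aux (bl : List String) (s0 : PySem.Set String) (e : String) :
    e ∈ bl.foldl (fun s b =>
      let t := PySem.Str.lower (PySem.Str.strip b)
      if t = "" then s
      else PySem.Set.add s (normalize_domain (((PySem.Str.split? t "/").getD []).headD ""))) s0
    ↔ e ∈ s0 ∨ ∃ b ∈ bl,
        PySem.Str.lower (PySem.Str.strip b) ≠ "" ∧
        normalize_domain (((PySem.Str.split? (PySem.Str.lower (PySem.Str.strip b)) "/").getD []).headD "") = e := by
  induction bl generalizing s0 with
  | nil => simp
  | cons b rest ih =>
    simp only [List.foldl_cons]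
    by_cases h : PySem.Str.lower (PySem.Str.strip b) = ""
    · simp only [h, ih]
      constructor
      · rintro (hs | ⟨x, hx, hne, heq⟩)
        · exact Or.inl hs
        · exact Or.inr ⟨x, List.mem_cons_of_mem _ hx, hne, heq⟩
      · rintro (hs | ⟨x, hx, hne, heq⟩)
        · exact Or.inl hs
        · rcases List.mem_cons.mp hx with hx | hx
          · exact absurd (hx ▸ h) hne
          · exact Or.inr ⟨x, hx, hne, heq⟩
    · simp only [if_neg h, ih, PySem.Set.mem_add]
      constructor
      · rintro ((hs | he) | ⟨x, hx, hne, heq⟩)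
        · exact Or.inl hs
        · exact Or.inr ⟨b, List.mem_cons_self .., h, he.symm⟩
        · exact Or.inr ⟨x, List.mem_cons_of_mem _ hx, hne, heq⟩
      · rintro (hs | ⟨x, hx, hne, heq⟩)
        · exact Or.inl (Or.inl hs)
        · rcases List.mem_cons.mp hx with hx | hx
          · exact Or.inl (Or.inr (hx ▸ heq.symm))
          · exact Or.inr ⟨x, hx, hne, heq⟩

theorem mem_entriesB (bl : List String) (e : String) :
    e ∈ entriesB bl ↔ ∃ b ∈ bl,
        PySem.Str.lower (PySem.Str.strip b) ≠ "" ∧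
        normalize_domain (((PySem.Str.split? (PySem.Str.lower (PySem.Str.strip b)) "/").getD []).headD "") = e := by
  unfold entriesB
  rw [mem_entriesB_aux]
  simp [PySem.Set.empty]

-- any over enumerate is an existential over indices
theorem any_enumerate (l : List Char) (k : Int) (f : Int × Char → Bool) :
    (PySem.List.enumerate l k).any f = true ↔ ∃ i : Nat, ∃ h : i < l.length, f (k + i, l[i]) = true := by
  induction l generalizing k with
  | nil => simp [PySem.List.enumerate_nil]
  | cons c rest ih =>
    rw [PySem.List.enumerate_cons]
    simp only [List.any_cons, Bool.or_eq_true, ih]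
    constructor
    · rintro (h0 | ⟨i, hi, hf⟩)
      · exact ⟨0, by simp, by simpa using h0⟩
      · exact ⟨i + 1, by simpa using hi, by simpa [add_assoc, add_comm 1 (i : Int)] using hf⟩
    · rintro ⟨i, hi, hf⟩
      cases i with
      | zero => exact Or.inl (by simpa using hf)
      | succ j =>
        exact Or.inr ⟨j, by simpa using hi, by
          simpa [add_assoc, add_comm 1 (j : Int)] using hf⟩

-- '.'+e is a suffix of l exactly when e is the part of l after some dot
theorem dot_suffix_iff (l e : List Char) :
    ('.' :: e) <:+ l ↔ ∃ i : Nat, ∃ h : i < l.length, l[i] = '.' ∧ l.drop (i + 1) = e := by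
  constructor
  · rintro ⟨t, ht⟩
    subst ht
    refine ⟨t.length, by simp, ?_, ?_⟩
    · simp
    · simp [List.drop_append]

  · rintro ⟨i, hi, hdot, hdrop⟩
    refine ⟨l.take i, ?_⟩
    conv_rhs => rw [← List.take_append_drop i l]
    congr 1
    rw [← List.getElem_cons_drop hi, hdot, hdrop]

-- characterize one entry's hit in terms of the dot-suffix candidates of d
theorem hitA_iff (d b : String) :
    hitA d b = true ↔
      (PySem.Str.lower (PySem.Str.strip b) ≠ "" ∧
        (normalize_domain (((PySem.Str.split? (PySem.Str.lower (PySem.Str.strip b)) "/").getD []).headD "") = d ∨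
          ∃ i : Nat, ∃ h : i < d.toList.length,
            d.toList[i] = '.' ∧
            (normalize_domain (((PySem.Str.split? (PySem.Str.lower (PySem.Str.strip b)) "/").getD []).headD "")).toList
              = d.toList.drop (i + 1))) := by
  unfold hitA
  by_cases h : PySem.Str.lower (PySem.Str.strip b) = ""
  · simp [h]
  · rw [if_neg h]
    simp only [Bool.or_eq_true, decide_eq_true_eq, PySem.Str.endswith_eq]
    simp only [ne_eq, h, not_false_eq_true, true_and]
    rw [PySem.Chars.endswith_iff, String.toList_append]
    rw [show ("." : String).toList = ['.'] from by decide, List.singleton_append, dot_suffix_iff]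
    constructor
    · rintro (heq | ⟨i, hi, hdot, hdrop⟩)
      · exact Or.inl heq.symm
      · exact Or.inr ⟨i, hi, hdot, hdrop.symm⟩
    · rintro (heq | ⟨i, hi, hdot, hdrop⟩)
      · exact Or.inl heq.symm
      · exact Or.inr ⟨i, hi, hdot, hdrop.symm⟩

-- toList of the slice d[i+1:] for a natural i
theorem toList_slice_succ (d : String) (i : Nat) :
    (PySem.Str.slice d (some ((i : Int) + 1)) none).toList = d.toList.drop (i + 1) := by
  rw [PySem.Str.toList_slice, PySem.Chars.slice_eq_listSlice]
  rw [show ((i : Int) + 1) = ((i + 1 : Nat) : Int) from by push_cast; ring]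
  rw [PySem.List.slice_from_natCast]

-- ===== VERDICT (by name: the statement is the Claim_ definition above) =====
theorem is_blocked_domain_spec : Claim_equal_is_blocked_domain := by
  intro domain blocklist _
  unfold Spec_is_blocked_domain is_blocked_domain is_blocked_domain_alt
  rw [Bool.eq_iff_iff, loopA_iff]
  simp only [Bool.or_eq_true]
  rw [PySem.Set.contains_iff, mem_entriesB, any_enumerate]
  constructor
  · rintro ⟨b, hb, hhit⟩
    obtain ⟨hne, hcase⟩ := (hitA_iff _ b).mp hhit
    rcases hcase with heq | ⟨i, hi, hdot, hdrop⟩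
    · exact Or.inl ⟨b, hb, hne, heq⟩
    · right
      refine ⟨i, hi, ?_⟩
      simp only [zero_add, Bool.and_eq_true, beq_iff_eq]
      refine ⟨hdot, ?_⟩
      rw [PySem.Set.contains_iff, mem_entriesB]
      exact ⟨b, hb, hne, by rw [← String.toList_inj, toList_slice_succ, hdrop]⟩
  · rintro (⟨b, hb, hne, heq⟩ | ⟨i, hi, hf⟩)
    · exact ⟨b, hb, (hitA_iff _ b).mpr ⟨hne, Or.inl heq⟩⟩
    · simp only [zero_add, Bool.and_eq_true, beq_iff_eq] at hf
      obtain ⟨hdot, hmem⟩ := hf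
      rw [PySem.Set.contains_iff, mem_entriesB] at hmem
      obtain ⟨b, hb, hne, heq⟩ := hmem
      exact ⟨b, hb, (hitA_iff _ b).mpr ⟨hne, Or.inr ⟨i, hi, hdot, by rw [heq, toList_slice_succ]⟩⟩⟩
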